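-- pv_equiv track=rewrite | github.com/bwdpaepe/dodona | oefening6.py | dubbels
-- ===== SOURCE A (Python) =====
-- def dubbels(inputlist):
--     inputset = set(inputlist)
--     wel_dubbels = []
--     geen_dubbels = []
--     for item in inputset:
--         if inputlist.count(item) > 1:
--             wel_dubbels.append(item)
--         else:
--             geen_dubbels.append(item)
--     return set(geen_dubbels), set(wel_dubbels)
-- ===== SOURCE B (Python) =====
-- def dubbels(inputlist):
--     seen = set()
--     dupes = set()
--     for item in inputlist:
--         if item in seen:
--             dupes.add(item)
--         else:
--             seen.add(item)
--     return seen - dupes, seen & dupes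
-- ===== Notes on version B (the rewrite author's own statement) =====
-- stated objective: faster
-- what changed: Replaces A's 'build the unique set, then rescan the whole list with .count for each unique element' with one membership-driven pass maintaining two sets (seen and dupes) and deriving the results as seen - dupes and seen & dupes, with no counting at all.
import Mathlib
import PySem

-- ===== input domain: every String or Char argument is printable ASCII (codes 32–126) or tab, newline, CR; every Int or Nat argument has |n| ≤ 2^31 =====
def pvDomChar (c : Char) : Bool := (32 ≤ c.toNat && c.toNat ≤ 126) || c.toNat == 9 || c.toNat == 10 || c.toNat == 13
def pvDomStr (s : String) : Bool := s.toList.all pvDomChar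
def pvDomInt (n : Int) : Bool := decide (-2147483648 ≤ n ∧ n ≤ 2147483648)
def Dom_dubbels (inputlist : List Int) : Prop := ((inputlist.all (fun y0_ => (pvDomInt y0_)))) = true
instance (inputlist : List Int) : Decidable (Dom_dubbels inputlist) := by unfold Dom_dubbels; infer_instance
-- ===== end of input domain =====

-- B replaces A's "build the unique set, then rescan the whole list with .count for each
-- unique element" with one membership-driven pass maintaining two sets (seen, dupes) and
-- derives the results as seen - dupes and seen & dupes; no counting at all. Objective: faster.
-- Both programs return a pair of Python SETS (here: lists of distinct elements).

-- ===== PORT A =====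
def dubbels (inputlist : List Int) : List Int × List Int :=
  let inputset : PySem.Set Int := PySem.Set.ofList inputlist
  -- for item in inputset: append to wel_dubbels if inputlist.count(item) > 1 else geen_dubbels
  let acc := inputset.foldl
    (fun (acc : List Int × List Int) item =>
      if PySem.List.count inputlist item > 1 then (acc.1 ++ [item], acc.2)
      else (acc.1, acc.2 ++ [item]))
    ([], [])
  (PySem.Set.ofList acc.2, PySem.Set.ofList acc.1)

-- ===== PORT B =====
def dubbels_alt (inputlist : List Int) : List Int × List Int :=
  -- one pass: if item in seen: dupes.add(item) else: seen.add(item)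
  let sd := inputlist.foldl
    (fun (p : PySem.Set Int × PySem.Set Int) item =>
      if PySem.Set.contains p.1 item then (p.1, PySem.Set.add p.2 item)
      else (PySem.Set.add p.1 item, p.2))
    (PySem.Set.empty, PySem.Set.empty)
  -- return seen - dupes, seen & dupes
  (PySem.Set.diff sd.1 sd.2, PySem.Set.inter sd.1 sd.2)

-- ===== PRECONDITION & SPEC =====
def Spec_dubbels (inputlist : List Int) (out : List Int × List Int) : Prop := out = dubbels_alt inputlist
instance (inputlist : List Int) (out : List Int × List Int) : Decidable (Spec_dubbels inputlist out) := by unfold Spec_dubbels; infer_instance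

-- ===== CLAIM (what is proved, stated in full; the proofs are below) =====
def Claim_equal_dubbels : Prop := ∀ (inputlist : List Int), Dom_dubbels inputlist → Spec_dubbels inputlist (dubbels inputlist)

-- ===== LEMMAS AND PROOFS =====

-- A's single loop with two accumulator lists, split into the two filters it builds.
theorem dubbels_fold_split (l xs : List Int) (a b : List Int) :
    (l.foldl (fun (acc : List Int × List Int) item =>
        if PySem.List.count xs item > 1 then (acc.1 ++ [item], acc.2)
        else (acc.1, acc.2 ++ [item])) (a, b))
    = (a ++ l.filter (fun item => decide (PySem.List.count xs item > 1)),
       b ++ l.filter (fun item => !decide (PySem.List.count xs item > 1))) := by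
  induction l generalizing a b with
  | nil => simp
  | cons x t ih =>
    simp only [List.foldl_cons]
    by_cases h : PySem.List.count xs x > 1
    · rw [if_pos h, ih]
      simp only [PySem.List.count] at h
      simp [h]
    · rw [if_neg h, ih]
      simp only [PySem.List.count] at h
      simp [h]

-- B's loop: the first component ("seen") collects every element, in first-occurrence order.
theorem dubbels_loop_fst (xs : List Int) (s d : PySem.Set Int) :
    (xs.foldl (fun (p : PySem.Set Int × PySem.Set Int) item =>
        if PySem.Set.contains p.1 item then (p.1, PySem.Set.add p.2 item)
        else (PySem.Set.add p.1 item, p.2)) (s, d)).1 = PySem.Set.update s xs := by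
  induction xs generalizing s d with
  | nil => simp [PySem.Set.update]
  | cons x t ih =>
    simp only [List.foldl_cons]
    by_cases h : PySem.Set.contains s x = true
    · rw [if_pos h, ih, PySem.Set.update_cons,
        PySem.Set.add_of_mem ((PySem.Set.contains_iff s x).mp h)]
    · rw [if_neg h, ih, PySem.Set.update_cons]

-- B's loop: membership in the second component ("dupes").
theorem dubbels_loop_snd_mem (y : Int) (xs : List Int) (s d : PySem.Set Int) :
    y ∈ (xs.foldl (fun (p : PySem.Set Int × PySem.Set Int) item =>
        if PySem.Set.contains p.1 item then (p.1, PySem.Set.add p.2 item)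
        else (PySem.Set.add p.1 item, p.2)) (s, d)).2
    ↔ y ∈ d ∨ (y ∈ xs ∧ (y ∈ s ∨ 2 ≤ List.count y xs)) := by
  induction xs generalizing s d with
  | nil => simp
  | cons x t ih =>
    simp only [List.foldl_cons]
    have hmc : ∀ z : Int, z ∈ t ↔ 0 < List.count z t := fun z => List.count_pos_iff.symm
    by_cases h : PySem.Set.contains s x = true
    · have hx : x ∈ s := (PySem.Set.contains_iff s x).mp h
      rw [if_pos h, ih]
      simp only [PySem.Set.mem_add, List.mem_cons, List.count_cons]
      by_cases hyx : y = x
      · subst hyx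
        simp [hx]
      · have hxy : ¬ ((x == y) = true) := by
          simp only [beq_iff_eq]
          exact fun he => hyx he.symm
        rw [if_neg hxy]
        simp [hyx]
    · have hx : x ∉ s := fun hm => h ((PySem.Set.contains_iff s x).mpr hm)
      rw [if_neg h, ih]
      simp only [PySem.Set.mem_add, List.mem_cons, List.count_cons]
      by_cases hyx : y = x
      · subst hyx
        rw [if_pos (beq_self_eq_true _)]
        constructor
        · rintro (hd' | ⟨hmem, -⟩)
          · exact Or.inl hd'
          · refine Or.inr ⟨Or.inl rfl, Or.inr ?_⟩
            have := (hmc _).mp hmem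
            omega
        · rintro (hd' | ⟨-, (hs | hcnt)⟩)
          · exact Or.inl hd'
          · exact absurd hs hx
          · exact Or.inr ⟨(hmc _).mpr (by omega), Or.inl (Or.inr rfl)⟩
      · have hxy : ¬ ((x == y) = true) := by
          simp only [beq_iff_eq]
          exact fun he => hyx he.symm
        rw [if_neg hxy]
        simp [hyx]

-- Python set difference and intersection are left-ordered filters (definitional).
theorem set_diff_eq (s t : List Int) :
    PySem.Set.diff s t = s.filter (fun x => !(PySem.Set.contains t x)) := rfl

theorem set_inter_eq (s t : List Int) :
    PySem.Set.inter s t = s.filter (fun x => PySem.Set.contains t x) := rfl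

-- ===== VERDICT (by name: the statement is the Claim_ definition above) =====
theorem dubbels_spec : Claim_equal_dubbels := by
  intro inputlist _
  show dubbels inputlist = dubbels_alt inputlist
  simp only [dubbels, dubbels_alt, dubbels_fold_split, List.nil_append, dubbels_loop_fst]
  have hseen : PySem.Set.update (PySem.Set.empty) inputlist = PySem.Set.ofList inputlist := rfl
  rw [hseen, set_diff_eq, set_inter_eq]
  have hnd := PySem.Set.nodup_ofList (xs := inputlist)
  have e : ∀ (p : Int → Bool), PySem.Set.ofList (List.filter p (PySem.Set.ofList inputlist))
      = List.filter p (PySem.Set.ofList inputlist) :=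
    fun p => PySem.Set.ofList_eq_self_of_nodup _ (hnd.filter p)
  rw [e, e]
  -- membership in B's "dupes" set is exactly "occurs at least twice"
  have hdup : ∀ y : Int,
      (y ∈ (inputlist.foldl (fun (p : PySem.Set Int × PySem.Set Int) item =>
          if PySem.Set.contains p.1 item then (p.1, PySem.Set.add p.2 item)
          else (PySem.Set.add p.1 item, p.2)) (PySem.Set.empty, PySem.Set.empty)).2)
      ↔ 2 ≤ List.count y inputlist := by
    intro y
    rw [dubbels_loop_snd_mem]
    constructor
    · rintro (h0 | ⟨-, (h0 | h2)⟩)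
      · exact absurd h0 List.not_mem_nil
      · exact absurd h0 List.not_mem_nil
      · exact h2
    · intro h2
      exact Or.inr ⟨List.count_pos_iff.mp (by omega), Or.inr h2⟩
  -- A's per-element test "count > 1" coincides with membership in "dupes"
  have peq : ∀ x : Int,
      decide (PySem.List.count inputlist x > 1)
      = PySem.Set.contains ((inputlist.foldl (fun (p : PySem.Set Int × PySem.Set Int) item =>
          if PySem.Set.contains p.1 item then (p.1, PySem.Set.add p.2 item)
          else (PySem.Set.add p.1 item, p.2)) (PySem.Set.empty, PySem.Set.empty)).2) x := by
    intro x
    by_cases h2 : 2 ≤ List.count x inputlist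
    · have ht : PySem.Set.contains _ x = true :=
        (PySem.Set.contains_iff _ _).mpr ((hdup x).mpr h2)
      have hd : decide (PySem.List.count inputlist x > 1) = true :=
        decide_eq_true (by simp only [PySem.List.count]; omega)
      rw [ht, hd]
    · have hf : PySem.Set.contains ((inputlist.foldl (fun (p : PySem.Set Int × PySem.Set Int) item =>
          if PySem.Set.contains p.1 item then (p.1, PySem.Set.add p.2 item)
          else (PySem.Set.add p.1 item, p.2)) (PySem.Set.empty, PySem.Set.empty)).2) x = false := by
        cases hb : PySem.Set.contains _ x
        · rfl
        · exact absurd ((hdup x).mp ((PySem.Set.contains_iff _ _).mp hb)) h2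
      have hdf : decide (PySem.List.count inputlist x > 1) = false :=
        decide_eq_false (by simp only [PySem.List.count]; omega)
      rw [hf, hdf]
  exact Prod.ext (List.filter_congr fun x _ => by rw [peq x])
    (List.filter_congr fun x _ => peq x)
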